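-- pv_equiv track=rewrite | github.com/Adm-Silvan/OCR-Processing-Pipeline | Chunker/late_chunker copy.py | merge_single_line_chunks
-- ===== SOURCE A (Python) =====
-- def merge_single_line_chunks(chunked_data):
--     """Merge single-line chunks into previous chunk"""
--     merged = []
--     for chunk, span in chunked_data:
--         if len(chunk) == 1 and merged:
--             # Merge with previous chunk
--             prev_chunk, prev_span = merged[-1]
--             merged[-1] = (
--                 prev_chunk + chunk,
--                 (prev_span[0], span[1])
--             )
--         else:
--             merged.append((chunk, span))
--     return merged
-- ===== SOURCE B (Python) =====
-- def merge_single_line_chunks(chunked_data):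
--     """Merge single-line chunks into previous chunk (group-then-combine)."""
--     groups = []
--     for item in chunked_data:
--         if groups and len(item[0]) == 1:
--             groups[-1].append(item)
--         else:
--             groups.append([item])
--     result = []
--     for g in groups:
--         merged_chunk = [line for chunk, _ in g for line in chunk]
--         result.append((merged_chunk, (g[0][1][0], g[-1][1][1])))
--     return result
-- ===== Notes on version B (the rewrite author's own statement) =====
-- stated objective: alternative
-- what changed: B first partitions the input into contiguous groups (a new group starts at the first item or any multi-line chunk) and then combines each group in a second pass by flattening its chunks and spanning first-start to last-end, instead of A's single pass that mutates the last accumulated entry in place.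
import Mathlib
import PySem

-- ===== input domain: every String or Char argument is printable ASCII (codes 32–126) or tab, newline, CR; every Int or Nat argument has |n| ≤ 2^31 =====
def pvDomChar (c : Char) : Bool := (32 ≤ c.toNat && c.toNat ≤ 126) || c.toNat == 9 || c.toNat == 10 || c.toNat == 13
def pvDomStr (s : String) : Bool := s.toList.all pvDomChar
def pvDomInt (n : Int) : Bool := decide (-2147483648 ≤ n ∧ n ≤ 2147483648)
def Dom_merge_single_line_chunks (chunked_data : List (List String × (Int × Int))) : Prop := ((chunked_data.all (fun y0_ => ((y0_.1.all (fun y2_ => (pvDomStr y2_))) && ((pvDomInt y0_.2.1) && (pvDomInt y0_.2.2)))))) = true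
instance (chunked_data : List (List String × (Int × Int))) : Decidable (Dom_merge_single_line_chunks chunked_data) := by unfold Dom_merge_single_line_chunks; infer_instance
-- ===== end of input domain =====

-- B replaces A's single pass that mutates the last accumulated entry with a two-phase
-- group-then-combine decomposition (alternative structure, same cost).

-- ===== PORT A =====
-- one loop iteration of A: merge a single-line chunk into merged[-1], else append
def pvMergeStepA (merged : List (List String × (Int × Int))) (x : List String × (Int × Int)) :
    List (List String × (Int × Int)) :=
  if x.1.length = 1 ∧ merged ≠ [] then
    merged.dropLast ++ [((merged.getLastD ([], (0, 0))).1 ++ x.1,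
                         ((merged.getLastD ([], (0, 0))).2.1, x.2.2))]
  else merged ++ [x]

def merge_single_line_chunks (chunked_data : List (List String × (Int × Int))) : List (List String × (Int × Int)) :=
  chunked_data.foldl pvMergeStepA []

-- ===== PORT B =====
-- phase 1 iteration: extend the last group with a single-line item, else open a new group
def pvGroupStepB (gs : List (List (List String × (Int × Int)))) (x : List String × (Int × Int)) :
    List (List (List String × (Int × Int))) :=
  if gs ≠ [] ∧ x.1.length = 1 then gs.dropLast ++ [gs.getLastD [] ++ [x]]
  else gs ++ [[x]]

-- phase 2: combine one group — flatten its chunks, span first-start to last-end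
def pvCombineB (g : List (List String × (Int × Int))) : List String × (Int × Int) :=
  (g.flatMap (·.1), ((g.headD ([], (0, 0))).2.1, (g.getLastD ([], (0, 0))).2.2))

def merge_single_line_chunks_alt (chunked_data : List (List String × (Int × Int))) : List (List String × (Int × Int)) :=
  (chunked_data.foldl pvGroupStepB []).map pvCombineB

-- ===== PRECONDITION & SPEC =====
def Spec_merge_single_line_chunks (chunked_data : List (List String × (Int × Int))) (out : List (List String × (Int × Int))) : Prop := out = merge_single_line_chunks_alt chunked_data
instance (chunked_data : List (List String × (Int × Int))) (out : List (List String × (Int × Int))) : Decidable (Spec_merge_single_line_chunks chunked_data out) := by unfold Spec_merge_single_line_chunks; infer_instance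

-- ===== CLAIM (what is proved, stated in full; the proofs are below) =====
def Claim_equal_merge_single_line_chunks : Prop := ∀ (chunked_data : List (List String × (Int × Int))), Dom_merge_single_line_chunks chunked_data → Spec_merge_single_line_chunks chunked_data (merge_single_line_chunks chunked_data)

-- ===== LEMMAS AND PROOFS =====

lemma pvCombineB_singleton (x : List String × (Int × Int)) : pvCombineB [x] = x := by
  cases x with
  | mk c s => cases s; simp [pvCombineB]

lemma pvCombineB_concat (g : List (List String × (Int × Int))) (hg : g ≠ [])
    (x : List String × (Int × Int)) :
    pvCombineB (g ++ [x]) =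
      ((pvCombineB g).1 ++ x.1, ((pvCombineB g).2.1, x.2.2)) := by
  cases g with
  | nil => exact absurd rfl hg
  | cons a t =>
    simp only [pvCombineB, List.flatMap_append, List.flatMap_cons,
      List.flatMap_nil, List.append_nil, List.headD_cons,
      show (a :: t) ++ [x] = a :: (t ++ [x]) from rfl]
    rw [show a :: (t ++ [x]) = (a :: t) ++ [x] from rfl, List.getLastD_concat]
    simp [List.append_assoc]

lemma pvStepA_eq (gs' : List (List (List String × (Int × Int))))
    (g : List (List String × (Int × Int))) (x : List String × (Int × Int))
    (hg : g ≠ []) (h1 : x.1.length = 1) :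
    pvMergeStepA ((gs' ++ [g]).map pvCombineB) x = (gs' ++ [g ++ [x]]).map pvCombineB := by
  have hmap : (gs' ++ [g]).map pvCombineB = gs'.map pvCombineB ++ [pvCombineB g] := by simp
  rw [pvMergeStepA, if_pos ⟨h1, by simp [hmap]⟩, hmap, List.dropLast_concat,
    List.getLastD_concat]
  simp [pvCombineB_concat g hg x]

lemma pvStepB_eq (gs' : List (List (List String × (Int × Int))))
    (g : List (List String × (Int × Int))) (x : List String × (Int × Int))
    (h1 : x.1.length = 1) :
    pvGroupStepB (gs' ++ [g]) x = gs' ++ [g ++ [x]] := by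
  rw [pvGroupStepB, if_pos ⟨by simp, h1⟩, List.dropLast_concat, List.getLastD_concat]

lemma pv_inv (l : List (List String × (Int × Int)))
    (gs : List (List (List String × (Int × Int))))
    (hne : ∀ g ∈ gs, g ≠ []) :
    l.foldl pvMergeStepA (gs.map pvCombineB) = (l.foldl pvGroupStepB gs).map pvCombineB := by
  induction l generalizing gs with
  | nil => rfl
  | cons x l ih =>
    by_cases hc : gs ≠ [] ∧ x.1.length = 1
    · rcases List.eq_nil_or_concat gs with rfl | ⟨gs', g, rfl⟩
      · exact absurd rfl hc.1
      · simp only [List.concat_eq_append] at hne ⊢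
        have hgne : g ≠ [] := hne g (by simp)
        simp only [List.foldl_cons, pvStepA_eq gs' g x hgne hc.2, pvStepB_eq gs' g x hc.2]
        exact ih (gs' ++ [g ++ [x]]) (by
          intro h hmem
          rcases List.mem_append.mp hmem with h1 | h1
          · exact hne h (List.mem_append.mpr (Or.inl h1))
          · simp at h1; subst h1; simp)
    · have hcA : ¬ (x.1.length = 1 ∧ gs.map pvCombineB ≠ []) := by
        intro h
        exact hc ⟨by simpa using h.2, h.1⟩
      simp only [List.foldl_cons, pvMergeStepA, if_neg hcA, pvGroupStepB, if_neg hc]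
      rw [show gs.map pvCombineB ++ [x] = (gs ++ [[x]]).map pvCombineB by
            simp [pvCombineB_singleton]]
      exact ih (gs ++ [[x]]) (by
        intro h hmem
        rcases List.mem_append.mp hmem with h1 | h1
        · exact hne h h1
        · simp at h1; subst h1; simp)

-- ===== VERDICT (by name: the statement is the Claim_ definition above) =====
theorem merge_single_line_chunks_spec : Claim_equal_merge_single_line_chunks := by
  intro d _
  unfold Spec_merge_single_line_chunks merge_single_line_chunks merge_single_line_chunks_alt
  simpa using pv_inv d [] (by simp)
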